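-- pv_equiv track=rewrite | github.com/ander-garcia/theegg_ai | tarea_38/palindromo.py | get_palindromo
-- ===== SOURCE A (Python) =====
-- def get_palindromo(numero, numero_max=100000000):
--     palindromo = -1
--     while palindromo < 0 and numero <= numero_max:
--         if is_palindromo(numero) and is_primo(numero):
--             palindromo = numero
--         else:
--             numero = numero + 1
--     return palindromo
--
-- def is_palindromo(numero):
--     palindromo = False
--     entrada = str(numero)
--     if entrada == entrada[::-1]:
--         palindromo = True
--     return palindromo
--
-- def is_primo(numero):
--     primo = True
--     for x in range(2, numero):
--         if numero % x == 0:
--             primo = False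
--             break
--     return primo
-- ===== SOURCE B (Python) =====
-- def _no_divisor_upto_sqrt(n):
--     d = 2
--     while d * d <= n:
--         if n % d == 0:
--             return False
--         d += 1
--     return True
--
--
-- def get_palindromo(numero, numero_max=100000000):
--     for n in range(numero, numero_max + 1):
--         s = str(n)
--         if s == s[::-1] and (n < 2 or _no_divisor_upto_sqrt(n)):
--             return n
--     return -1
-- ===== Notes on version B (the rewrite author's own statement) =====
-- stated objective: faster
-- what changed: B tests primality by trial division only up to the square root with an early return instead of A's scan of every divisor below n (reproducing A's edge behaviour that n < 2 passes), and runs the candidate scan as a single inlined for-range loop instead of A's flag-driven while loop with helper calls.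
import Mathlib
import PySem

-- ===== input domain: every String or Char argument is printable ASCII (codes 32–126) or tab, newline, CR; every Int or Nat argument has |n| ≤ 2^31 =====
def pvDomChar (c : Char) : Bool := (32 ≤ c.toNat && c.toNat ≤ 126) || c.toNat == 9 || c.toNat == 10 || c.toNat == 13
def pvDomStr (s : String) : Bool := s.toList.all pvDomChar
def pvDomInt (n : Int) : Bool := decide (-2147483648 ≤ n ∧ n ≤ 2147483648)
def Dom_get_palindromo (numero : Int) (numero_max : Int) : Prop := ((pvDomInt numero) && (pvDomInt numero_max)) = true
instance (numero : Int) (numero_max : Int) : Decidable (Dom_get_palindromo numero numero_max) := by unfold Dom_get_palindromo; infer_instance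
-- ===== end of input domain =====

-- B replaces A's trial division over every x in range(2, n) by trial division only up to √n
-- with an early return (objective: faster, per candidate O(√n) instead of O(n)).

-- ===== PORT A =====
def is_palindromo (numero : Int) : Bool :=
  let palindromo := false
  let entrada := PySem.Int.toStr numero
  if PySem.Str.slice? entrada none none (-1) = some entrada then true else palindromo

def is_primo (numero : Int) : Bool :=
  -- for x in range(2, numero): first divisor found flips primo and breaks
  match (PySem.List.pyRange 2 numero 1).find? (fun x => PySem.Int.mod numero x == 0) with
  | some _ => false
  | none => true

-- while palindromo < 0 and numero <= numero_max: palindromo is only ever set to the current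
-- numero, after which the loop exits, so the while is ported as this early-exit recursion.
def get_palindromo (numero : Int) (numero_max : Int) : Int :=
  if _h : numero ≤ numero_max then
    if is_palindromo numero && is_primo numero then numero
    else get_palindromo (numero + 1) numero_max
  else -1
termination_by (numero_max + 1 - numero).toNat
decreasing_by omega

-- ===== PORT B =====
-- termination helper for the √n loop: d*d ≤ n forces d ≤ n
theorem pv_le_of_sq_le (d n : Int) (h : d * d ≤ n) : d ≤ n := by
  rcases le_total d 0 with h0 | h0
  · nlinarith
  · nlinarith

def no_divisor_upto_sqrt (n : Int) (d : Int) : Bool :=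
  if h : d * d ≤ n then
    if PySem.Int.mod n d == 0 then false
    else no_divisor_upto_sqrt n (d + 1)
  else true
termination_by (n + 1 - d).toNat
decreasing_by have := pv_le_of_sq_le d n h; omega

def get_palindromo_alt (numero : Int) (numero_max : Int) : Int :=
  if _h : numero ≤ numero_max then
    let s := PySem.Int.toStr numero
    if (PySem.Str.slice? s none none (-1) == some s)
        && (decide (numero < 2) || no_divisor_upto_sqrt numero 2) then numero
    else get_palindromo_alt (numero + 1) numero_max
  else -1
termination_by (numero_max + 1 - numero).toNat
decreasing_by omega

-- ===== PRECONDITION & SPEC =====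
def Spec_get_palindromo (numero : Int) (numero_max : Int) (out : Int) : Prop := out = get_palindromo_alt numero numero_max
instance (numero : Int) (numero_max : Int) (out : Int) : Decidable (Spec_get_palindromo numero numero_max out) := by unfold Spec_get_palindromo; infer_instance

-- ===== CLAIM (what is proved, stated in full; the proofs are below) =====
def Claim_equal_get_palindromo : Prop := ∀ (numero : Int) (numero_max : Int), Dom_get_palindromo numero numero_max → Spec_get_palindromo numero numero_max (get_palindromo numero numero_max)

-- ===== LEMMAS AND PROOFS =====

-- B's √n loop returns true iff no candidate ≥ d with square ≤ n divides n
theorem noDiv_iff (n : Int) (d : Int) : 2 ≤ d →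
    (no_divisor_upto_sqrt n d = true ↔ ∀ e, d ≤ e → e * e ≤ n → ¬ PySem.Int.mod n e = 0) := by
  fun_induction no_divisor_upto_sqrt n d with
  | case2 d hle hdvd ih =>
    intro hd
    constructor
    · intro h e he hee
      rcases eq_or_lt_of_le he with rfl | hlt
      · simpa using hdvd
      · exact ((ih (by omega)).mp h) e (by omega) hee
    · intro h
      exact (ih (by omega)).mpr (fun e he hee => h e (by omega) hee)
  | case1 d hle hdvd =>
    intro hd
    refine iff_of_false (by simp) ?_
    intro h
    exact (h d le_rfl hle) (by simpa using hdvd)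
  | case3 d hle =>
    intro hd
    refine iff_of_true rfl ?_
    intro e he hee
    exfalso
    have : d * d ≤ e * e := by nlinarith
    omega

-- for n ≥ 2, "no divisor in [2, n)" is the same as "no divisor d with d*d ≤ n"
theorem divisor_sqrt (n : Int) (hn : 2 ≤ n) :
    (∀ x, 2 ≤ x → x < n → ¬ PySem.Int.mod n x = 0) ↔
    (∀ e, 2 ≤ e → e * e ≤ n → ¬ PySem.Int.mod n e = 0) := by
  constructor
  · intro h e he hee
    exact h e he (by nlinarith)
  · intro h x hx hxn hmod
    have hdvd : x ∣ n := (PySem.Int.mod_eq_zero_iff_dvd n x).mp hmod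
    obtain ⟨k, hk⟩ := hdvd
    have hk2 : 2 ≤ k := by nlinarith
    by_cases hxx : x * x ≤ n
    · exact h x hx hxx hmod
    · have hkx : k < x := by nlinarith
      have hkk : k * k ≤ n := by nlinarith
      have : PySem.Int.mod n k = 0 := by
        exact (PySem.Int.mod_eq_zero_iff_dvd n k).mpr ⟨x, by linarith [hk, mul_comm x k]⟩
      exact h k hk2 hkk this
  
-- the two prime tests agree on every integer
theorem primo_eq (n : Int) :
    is_primo n = (decide (n < 2) || no_divisor_upto_sqrt n 2) := by
  by_cases hn : n < 2
  · have : PySem.List.pyRange 2 n 1 = [] := PySem.List.pyRange_one_eq_nil (by omega)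
    simp [is_primo, this, hn]
  · rw [not_lt] at hn
    have hlhs : is_primo n = true ↔
        ∀ x, 2 ≤ x → x < n → ¬ PySem.Int.mod n x = 0 := by
      unfold is_primo
      rcases hfind : (PySem.List.pyRange 2 n 1).find? (fun x => PySem.Int.mod n x == 0) with _ | x
      · rw [List.find?_eq_none] at hfind
        refine iff_of_true rfl ?_
        intro x h2 hx
        have := hfind x ((PySem.List.mem_pyRange_one).mpr ⟨h2, hx⟩)
        simpa using this
      · have hmem := List.find?_some hfind
        have hx := List.mem_of_find?_eq_some hfind
        rw [PySem.List.mem_pyRange_one] at hx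
        refine iff_of_false (by simp) ?_
        intro h
        exact (h x hx.1 hx.2) (by simpa using hmem)
    have hrhs : (decide (n < 2) || no_divisor_upto_sqrt n 2) = true ↔
        ∀ e, 2 ≤ e → e * e ≤ n → ¬ PySem.Int.mod n e = 0 := by
      simp only [Bool.or_eq_true, decide_eq_true_eq]
      rw [noDiv_iff n 2 le_rfl]
      constructor
      · rintro (h | h)
        · omega
        · exact h
      · exact Or.inr
    rw [Bool.eq_iff_iff, hlhs, hrhs]
    exact divisor_sqrt n hn

-- the candidate tests of the two loops agree
theorem cond_eq (n : Int) :
    (is_palindromo n && is_primo n)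
      = ((PySem.Str.slice? (PySem.Int.toStr n) none none (-1) == some (PySem.Int.toStr n))
          && (decide (n < 2) || no_divisor_upto_sqrt n 2)) := by
  rw [← primo_eq]
  unfold is_palindromo
  simp only []
  split_ifs with h
  · simp [h]
  · simp [h]

theorem loop_eq : ∀ (a m : Int), get_palindromo a m = get_palindromo_alt a m := by
  intro a m
  fun_induction get_palindromo a m with
  | case1 a hle hcond =>
    rw [get_palindromo_alt]
    rw [cond_eq] at hcond
    simp only [hle, dif_pos, hcond, if_pos]
  | case2 a hle hcond ih =>
    rw [get_palindromo_alt]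
    rw [cond_eq] at hcond
    simp only [hle, dif_pos, hcond, Bool.false_eq_true]
    exact ih
  | case3 a hle =>
    rw [get_palindromo_alt]
    simp [hle]

-- ===== VERDICT (by name: the statement is the Claim_ definition above) =====
theorem get_palindromo_spec : Claim_equal_get_palindromo := by
  intro numero numero_max _
  unfold Spec_get_palindromo
  exact loop_eq numero numero_max
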